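-- pv_equiv track=rewrite | github.com/karans9373/book-store-management-system | app.py | recommendation_groups
-- ===== SOURCE A (Python) =====
-- def recommendation_groups(books):
--     groups = {
--         "Happy reads": [],
--         "Thrillers tonight": [],
--         "Exam prep mode": [],
--         "Weekend reads": [],
--     }
--     for book in books:
--         tags = book["mood_tags"].lower()
--         if "happy" in tags or "romantic" in tags:
--             groups["Happy reads"].append(book)
--         if "thriller" in tags or "mysterious" in tags or "night" in tags:
--             groups["Thrillers tonight"].append(book)
--         if "exam" in tags or "student" in tags or "learning" in tags:
--             groups["Exam prep mode"].append(book)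
--         if "weekend" in tags or "fiction" in tags or "adventure" in tags:
--             groups["Weekend reads"].append(book)
--     return groups
-- ===== SOURCE B (Python) =====
-- CATEGORIES = {
--     "Happy reads": ["happy", "romantic"],
--     "Thrillers tonight": ["thriller", "mysterious", "night"],
--     "Exam prep mode": ["exam", "student", "learning"],
--     "Weekend reads": ["weekend", "fiction", "adventure"],
-- }
--
--
-- def recommendation_groups(books):
--     return {
--         name: [b for b in books if any(kw in b["mood_tags"].lower() for kw in kws)]
--         for name, kws in CATEGORIES.items()
--     }
-- ===== Notes on version B (the rewrite author's own statement) =====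
-- stated objective: idiomatic
-- what changed: Replaces the single pass with four inline if-branches appending into pre-built dict buckets by a keyword table CATEGORIES and a dict comprehension that filters the book list once per category.
import Mathlib
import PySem

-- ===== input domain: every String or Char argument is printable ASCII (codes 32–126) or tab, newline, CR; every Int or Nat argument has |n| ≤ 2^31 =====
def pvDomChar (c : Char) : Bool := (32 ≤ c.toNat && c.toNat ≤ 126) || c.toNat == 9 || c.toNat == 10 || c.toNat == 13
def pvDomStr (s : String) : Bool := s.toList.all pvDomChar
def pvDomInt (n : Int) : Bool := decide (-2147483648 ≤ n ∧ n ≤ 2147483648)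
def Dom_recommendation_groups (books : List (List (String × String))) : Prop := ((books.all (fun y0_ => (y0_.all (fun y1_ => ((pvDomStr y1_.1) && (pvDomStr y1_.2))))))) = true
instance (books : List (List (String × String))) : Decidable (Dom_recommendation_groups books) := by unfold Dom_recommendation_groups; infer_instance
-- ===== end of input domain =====

-- B replaces A's single pass with four inline if-branches by a keyword table and one filter per category (idiomatic decomposition, same cost).


-- ===== PORT A =====
-- book["mood_tags"].lower(); the .getD "" default is only reached where Python raises KeyError (excluded by Pre_)
def pvTagsA (book : List (String × String)) : String :=
  PySem.Str.lower (((PySem.Dict.mk book).get? "mood_tags").getD "")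

-- loop body of A: one book, the four if-branches in order (a 4-tuple holds the dict's fixed buckets)
def pvStepA (g : List (List (String × String)) × List (List (String × String)) × List (List (String × String)) × List (List (String × String)))
    (book : List (String × String)) :
    List (List (String × String)) × List (List (String × String)) × List (List (String × String)) × List (List (String × String)) :=
  let tags := pvTagsA book
  let g := if PySem.Str.isIn "happy" tags || PySem.Str.isIn "romantic" tags then
             (g.1 ++ [book], g.2.1, g.2.2.1, g.2.2.2) else g
  let g := if PySem.Str.isIn "thriller" tags || PySem.Str.isIn "mysterious" tags || PySem.Str.isIn "night" tags then
             (g.1, g.2.1 ++ [book], g.2.2.1, g.2.2.2) else g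
  let g := if PySem.Str.isIn "exam" tags || PySem.Str.isIn "student" tags || PySem.Str.isIn "learning" tags then
             (g.1, g.2.1, g.2.2.1 ++ [book], g.2.2.2) else g
  let g := if PySem.Str.isIn "weekend" tags || PySem.Str.isIn "fiction" tags || PySem.Str.isIn "adventure" tags then
             (g.1, g.2.1, g.2.2.1, g.2.2.2 ++ [book]) else g
  g

def recommendation_groups (books : List (List (String × String))) : List (String × List (List (String × String))) :=
  let g := books.foldl pvStepA ([], [], [], [])
  [("Happy reads", g.1), ("Thrillers tonight", g.2.1), ("Exam prep mode", g.2.2.1), ("Weekend reads", g.2.2.2)]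

-- ===== PORT B =====
def pvCategories : List (String × List String) :=
  [("Happy reads", ["happy", "romantic"]),
   ("Thrillers tonight", ["thriller", "mysterious", "night"]),
   ("Exam prep mode", ["exam", "student", "learning"]),
   ("Weekend reads", ["weekend", "fiction", "adventure"])]

def pvTagsB (book : List (String × String)) : String :=
  PySem.Str.lower (((PySem.Dict.mk book).get? "mood_tags").getD "")

def recommendation_groups_alt (books : List (List (String × String))) : List (String × List (List (String × String))) :=
  pvCategories.map (fun nk =>
    (nk.1, books.filter (fun b => nk.2.any (fun kw => PySem.Str.isIn kw (pvTagsB b)))))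

-- ===== PRECONDITION & SPEC =====
-- Pre_ excludes books without a "mood_tags" key, on which Python A raises KeyError (B raises it too).
def Pre_recommendation_groups (books : List (List (String × String))) : Prop :=
  ∀ b ∈ books, ((PySem.Dict.mk b).get? "mood_tags").isSome = true
instance (books : List (List (String × String))) : Decidable (Pre_recommendation_groups books) := by unfold Pre_recommendation_groups; infer_instance
def pvWitness_recommendation_groups : (List (List (String × String))) :=
  [[("mood_tags", "happy night"), ("title", "T")]]

def Spec_recommendation_groups (books : List (List (String × String))) (out : List (String × List (List (String × String)))) : Prop := out = recommendation_groups_alt books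
instance (books : List (List (String × String))) (out : List (String × List (List (String × String)))) : Decidable (Spec_recommendation_groups books out) := by unfold Spec_recommendation_groups; infer_instance

-- ===== CLAIM (what is proved, stated in full; the proofs are below) =====
def Claim_equal_recommendation_groups : Prop := ∀ (books : List (List (String × String))), Dom_recommendation_groups books → Pre_recommendation_groups books → Spec_recommendation_groups books (recommendation_groups books)

-- ===== LEMMAS AND PROOFS =====

def pvP1 (b : List (String × String)) : Bool :=
  PySem.Str.isIn "happy" (pvTagsA b) || PySem.Str.isIn "romantic" (pvTagsA b)
def pvP2 (b : List (String × String)) : Bool :=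
  PySem.Str.isIn "thriller" (pvTagsA b) || PySem.Str.isIn "mysterious" (pvTagsA b) || PySem.Str.isIn "night" (pvTagsA b)
def pvP3 (b : List (String × String)) : Bool :=
  PySem.Str.isIn "exam" (pvTagsA b) || PySem.Str.isIn "student" (pvTagsA b) || PySem.Str.isIn "learning" (pvTagsA b)
def pvP4 (b : List (String × String)) : Bool :=
  PySem.Str.isIn "weekend" (pvTagsA b) || PySem.Str.isIn "fiction" (pvTagsA b) || PySem.Str.isIn "adventure" (pvTagsA b)

theorem pvStepA_eq (g : List (List (String × String)) × List (List (String × String)) × List (List (String × String)) × List (List (String × String)))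
    (book : List (String × String)) :
    pvStepA g book =
      ((if pvP1 book = true then g.1 ++ [book] else g.1),
       (if pvP2 book = true then g.2.1 ++ [book] else g.2.1),
       (if pvP3 book = true then g.2.2.1 ++ [book] else g.2.2.1),
       (if pvP4 book = true then g.2.2.2 ++ [book] else g.2.2.2)) := by
  unfold pvStepA pvP1 pvP2 pvP3 pvP4
  by_cases h1 : (PySem.Str.isIn "happy" (pvTagsA book) || PySem.Str.isIn "romantic" (pvTagsA book)) = true <;>
    by_cases h2 : (PySem.Str.isIn "thriller" (pvTagsA book) || PySem.Str.isIn "mysterious" (pvTagsA book) || PySem.Str.isIn "night" (pvTagsA book)) = true <;>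
    by_cases h3 : (PySem.Str.isIn "exam" (pvTagsA book) || PySem.Str.isIn "student" (pvTagsA book) || PySem.Str.isIn "learning" (pvTagsA book)) = true <;>
    by_cases h4 : (PySem.Str.isIn "weekend" (pvTagsA book) || PySem.Str.isIn "fiction" (pvTagsA book) || PySem.Str.isIn "adventure" (pvTagsA book)) = true <;>
    simp_all

theorem pv_fold_char (books : List (List (String × String)))
    (a b c d : List (List (String × String))) :
    books.foldl pvStepA (a, b, c, d)
    = (a ++ books.filter pvP1, b ++ books.filter pvP2, c ++ books.filter pvP3, d ++ books.filter pvP4) := by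
  induction books generalizing a b c d with
  | nil => simp
  | cons x xs ih =>
    rw [List.foldl_cons, pvStepA_eq]
    by_cases h1 : pvP1 x = true <;> by_cases h2 : pvP2 x = true <;>
      by_cases h3 : pvP3 x = true <;> by_cases h4 : pvP4 x = true <;>
      simp only [h1, h2, h3, h4, if_true, if_false, Bool.not_eq_true, eq_self_iff_true, ite_true, ite_false, if_pos, if_neg, not_false_iff] <;>
      (rw [ih]; simp [List.filter_cons, h1, h2, h3, h4])

theorem pv_filter_eq (books : List (List (String × String))) (p : List (String × String) → Bool)
    (kws : List String) (hpq : ∀ b, p b = kws.any (fun kw => PySem.Str.isIn kw (pvTagsB b))) :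
    books.filter p = books.filter (fun b => kws.any (fun kw => PySem.Str.isIn kw (pvTagsB b))) := by
  apply List.filter_congr
  intro b _
  exact hpq b

-- ===== VERDICT (by name: the statement is the Claim_ definition above) =====
theorem recommendation_groups_spec : Claim_equal_recommendation_groups := by
  intro books _ _
  unfold Spec_recommendation_groups recommendation_groups recommendation_groups_alt pvCategories
  rw [pv_fold_char]
  simp only [List.map_cons, List.map_nil, List.nil_append]
  refine congrArg₂ _ ?_ (congrArg₂ _ ?_ (congrArg₂ _ ?_ (congrArg₂ _ ?_ rfl))) <;>
    refine congrArg _ ?_ <;>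
    [exact pv_filter_eq _ _ _ (fun b => by simp [pvP1, pvTagsA, pvTagsB, List.any]);
     exact pv_filter_eq _ _ _ (fun b => by simp [pvP2, pvTagsA, pvTagsB, List.any, Bool.or_assoc]);
     exact pv_filter_eq _ _ _ (fun b => by simp [pvP3, pvTagsA, pvTagsB, List.any, Bool.or_assoc]);
     exact pv_filter_eq _ _ _ (fun b => by simp [pvP4, pvTagsA, pvTagsB, List.any, Bool.or_assoc])]
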